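-- pv_equiv track=rewrite | github.com/TheGoodall/networks | 1.py | out_degree_distribution
-- ===== SOURCE A (Python) =====
-- def compute_out_degrees(digraph):
-- 	out_degree = {}
--
-- 	for vertex in digraph:
-- 		out_degree[vertex] = 0
-- 	#consider each vertex
-- 	for vertex in digraph:
-- 		#amend in_degree[w] for each outgoing edge from v to w
-- 		for _ in digraph[vertex]:
-- 			out_degree[vertex] += 1
-- 	return out_degree
--
-- def out_degree_distribution(digraph):
-- 	"""Takes a directed graph and computes the unnormalized distribution of the
-- 	out-degrees of the graph.  Returns a dictionary whose keys correspond to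
-- 	out-degrees of nodes in the graph and values are the number of nodes with
-- 	that out-degree. Out-degrees with no corresponding nodes in the graph are not
-- 	included in the dictionary."""
-- 	#find out_degrees
-- 	out_degree = compute_out_degrees(digraph)
-- 	#initialize dictionary for degree distribution
-- 	degree_distribution = {}
-- 	#consider each vertex
-- 	for vertex in out_degree:
-- 		#update degree_distribution
-- 		if out_degree[vertex] in degree_distribution:
-- 			degree_distribution[out_degree[vertex]] += 1
-- 		else:
-- 			degree_distribution[out_degree[vertex]] = 1
-- 	return degree_distribution
-- ===== SOURCE B (Python) =====
-- def out_degree_distribution(digraph):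
-- 	"""One combined pass: no per-vertex out-degree table is built."""
-- 	degree_distribution = {}
-- 	for vertex in digraph:
-- 		degree = len(digraph[vertex])
-- 		degree_distribution[degree] = degree_distribution.get(degree, 0) + 1
-- 	return degree_distribution
-- ===== Notes on version B (the rewrite author's own statement) =====
-- stated objective: simpler
-- what changed: Replaced the build-a-per-vertex-degree-table-then-rescan shape (three loops plus a helper) by a single pass that reads each vertex's degree with len() and bumps the result dict directly; the intermediate out_degree dictionary disappears.
import Mathlib
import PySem

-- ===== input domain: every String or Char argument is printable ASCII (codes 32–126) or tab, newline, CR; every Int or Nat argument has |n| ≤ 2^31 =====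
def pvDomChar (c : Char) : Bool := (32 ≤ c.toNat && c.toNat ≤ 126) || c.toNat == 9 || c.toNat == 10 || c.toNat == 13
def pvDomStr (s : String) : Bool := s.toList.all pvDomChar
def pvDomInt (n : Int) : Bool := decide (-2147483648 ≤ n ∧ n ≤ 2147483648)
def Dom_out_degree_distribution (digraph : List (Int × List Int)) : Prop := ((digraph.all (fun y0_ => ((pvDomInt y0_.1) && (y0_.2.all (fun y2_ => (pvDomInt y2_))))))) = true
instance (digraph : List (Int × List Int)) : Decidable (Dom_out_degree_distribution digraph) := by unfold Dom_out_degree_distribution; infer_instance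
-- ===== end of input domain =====

-- B inlines A's helper and makes ONE pass: each vertex's out-degree is read off as len(digraph[vertex])
-- and counted directly into the result dict; the intermediate per-vertex out_degree table disappears (objective: simpler).

-- ===== PORT A =====
def compute_out_degrees (digraph : PySem.Dict Int (List Int)) : PySem.Dict Int Int :=
  let od := digraph.keys.foldl (fun acc vertex => acc.insert vertex 0) PySem.Dict.empty
  digraph.keys.foldl (fun acc vertex =>
    (digraph.getD vertex []).foldl (fun acc2 _ => acc2.modify vertex 0 (· + 1)) acc) od

def out_degree_distribution (digraph : List (Int × List Int)) : List (Int × Int) :=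
  let d := PySem.Dict.ofList digraph
  let od := compute_out_degrees d
  (od.keys.foldl (fun dist vertex =>
      if dist.contains (od.getD vertex 0) then dist.modify (od.getD vertex 0) 0 (· + 1)
      else dist.insert (od.getD vertex 0) 1) PySem.Dict.empty).items

-- ===== PORT B =====
def out_degree_distribution_alt (digraph : List (Int × List Int)) : List (Int × Int) :=
  let d := PySem.Dict.ofList digraph
  (d.keys.foldl (fun dist vertex =>
      let degree : Int := ((d.getD vertex []).length : Int)
      dist.insert degree (dist.getD degree 0 + 1)) PySem.Dict.empty).items

-- ===== PRECONDITION & SPEC =====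
def Spec_out_degree_distribution (digraph : List (Int × List Int)) (out : List (Int × Int)) : Prop := out = out_degree_distribution_alt digraph
instance (digraph : List (Int × List Int)) (out : List (Int × Int)) : Decidable (Spec_out_degree_distribution digraph out) := by unfold Spec_out_degree_distribution; infer_instance

-- ===== CLAIM (what is proved, stated in full; the proofs are below) =====
def Claim_equal_out_degree_distribution : Prop := ∀ (digraph : List (Int × List Int)), Dom_out_degree_distribution digraph → Spec_out_degree_distribution digraph (out_degree_distribution digraph)

-- ===== LEMMAS AND PROOFS =====

-- A's if/else update of the distribution dict is exactly the insert/get form B uses.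
lemma dist_step_eq (dist : PySem.Dict Int Int) (k : Int) :
    (if dist.contains k then dist.modify k 0 (· + 1) else dist.insert k 1)
      = dist.insert k (dist.getD k 0 + 1) := by
  by_cases h : dist.contains k = true
  · simp [h, PySem.Dict.modify]
  · have h' : dist.contains k = false := by simpa using h
    rw [if_neg (by simp [h']), PySem.Dict.getD_of_not_contains dist 0 h']
    norm_num

-- the zero-initialisation loop leaves every getD _ 0 at 0
lemma getD_init_zero (l : List Int) (acc : PySem.Dict Int Int) (x : Int) (h : acc.getD x 0 = 0) :
    (l.foldl (fun a v => a.insert v (0 : Int)) acc).getD x 0 = 0 := by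
  induction l generalizing acc with
  | nil => simpa
  | cons v t ih =>
      simp only [List.foldl_cons]
      apply ih
      rw [PySem.Dict.getD_insert]
      split <;> simp [h]

lemma count_map_const (l : List Int) (v x : Int) :
    (l.map (fun _ => v)).count x = if x = v then l.length else 0 := by
  induction l with
  | nil => simp
  | cons a t ih =>
      simp only [List.map_cons, List.count_cons, ih]
      by_cases h : x = v
      · simp [h]
      · simp [h, beq_iff_eq, Ne.symm h]

-- effect of one inner "for _ in digraph[vertex]" loop on a getD
lemma getD_inner (lst : List Int) (v : Int) (acc : PySem.Dict Int Int) (x : Int) :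
    (lst.foldl (fun a2 (_ : Int) => a2.modify v 0 (· + 1)) acc).getD x 0
      = acc.getD x 0 + (if x = v then (lst.length : Int) else 0) := by
  have hmap : ((lst.map (fun _ => v)).foldl (fun a2 y => a2.modify y 0 (· + 1)) acc)
      = lst.foldl (fun a2 (_ : Int) => a2.modify v 0 (· + 1)) acc := by
    rw [List.foldl_map]
  rw [← hmap, PySem.Dict.getD_foldl_modify_add_one, count_map_const]
  split <;> simp

-- effect of A's whole counting loop on a getD, for a duplicate-free key list
lemma getD_outer (d : PySem.Dict Int (List Int)) (l : List Int) (acc : PySem.Dict Int Int)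
    (x : Int) (hl : l.Nodup) :
    (l.foldl (fun a v => (d.getD v []).foldl (fun a2 (_ : Int) => a2.modify v 0 (· + 1)) a) acc).getD x 0
      = acc.getD x 0 + (if x ∈ l then ((d.getD x []).length : Int) else 0) := by
  induction l generalizing acc with
  | nil => simp
  | cons v t ih =>
      rcases List.nodup_cons.mp hl with ⟨hv, ht⟩
      simp only [List.foldl_cons]
      rw [ih _ ht, getD_inner]
      by_cases h : x = v
      · subst h
        have hxt : x ∉ t := hv
        simp [hxt]
      · simp [h, List.mem_cons]

-- A's counting loop never adds or removes keys when every looped vertex is already a key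
lemma keys_outer (d : PySem.Dict Int (List Int)) (l : List Int) (acc : PySem.Dict Int Int)
    (h : ∀ v ∈ l, v ∈ acc.keys) :
    (l.foldl (fun a v => (d.getD v []).foldl (fun a2 (_ : Int) => a2.modify v 0 (· + 1)) a) acc).keys
      = acc.keys := by
  induction l generalizing acc with
  | nil => rfl
  | cons v t ih =>
      simp only [List.foldl_cons]
      have hkeys : ((d.getD v []).foldl (fun a2 (_ : Int) => a2.modify v 0 (· + 1)) acc).keys
          = acc.keys := by
        rw [PySem.Dict.keys_foldl_modify_key (d.getD v []) (fun _ => v) 0 (fun _ _ => (· + 1)) acc,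
            PySem.Set.update_eq_append_filter]
        have : (List.filter (fun y => !PySem.Set.contains acc.keys y)
            (PySem.Set.ofList ((d.getD v []).map (fun _ => v)))) = [] := by
          rw [List.filter_eq_nil_iff]
          intro y hy
          have hy' : y ∈ (d.getD v []).map (fun _ => v) := by
            simpa [PySem.Set.mem_ofList] using hy
          have : y = v := by
            rcases List.mem_map.mp hy' with ⟨_, _, rfl⟩; rfl
          subst this
          have hv : y ∈ acc.keys := h y (by simp)
          simp [PySem.Set.contains, hv]
        rw [this]
        simp
      rw [ih _ (fun w hw => by rw [hkeys]; exact h w (by simp [hw])), hkeys]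

-- ===== VERDICT (by name: the statement is the Claim_ definition above) =====
theorem out_degree_distribution_spec : Claim_equal_out_degree_distribution := by
  intro digraph _
  unfold Spec_out_degree_distribution out_degree_distribution out_degree_distribution_alt
    compute_out_degrees
  simp only []
  set d := PySem.Dict.ofList digraph with hd
  have hnd : d.keys.Nodup := PySem.Dict.nodup_keys_ofList digraph
  set od0 : PySem.Dict Int Int := d.keys.foldl (fun acc v => acc.insert v 0) PySem.Dict.empty with hod0
  set od : PySem.Dict Int Int := d.keys.foldl
      (fun acc v => (d.getD v []).foldl (fun a2 (_ : Int) => a2.modify v 0 (· + 1)) acc) od0 with hod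
  have hkeys0 : od0.keys = d.keys := by
    rw [hod0, PySem.Dict.keys_foldl_insert d.keys (fun _ _ => (0 : Int)) PySem.Dict.empty]
    show PySem.Set.ofList d.keys = d.keys
    exact PySem.Set.ofList_eq_self_of_nodup _ hnd
  have hkeys : od.keys = d.keys := by
    rw [hod, keys_outer _ _ _ (fun v hv => by rw [hkeys0]; exact hv), hkeys0]
  have hgetD : ∀ v ∈ d.keys, od.getD v 0 = ((d.getD v []).length : Int) := by
    intro v hv
    rw [hod, getD_outer _ _ _ _ hnd]
    rw [getD_init_zero _ _ _ (by simp [PySem.Dict.getD_empty])]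
    simp [hv]
  rw [hkeys]
  congr 1
  apply PySem.List.foldl_congr_mem
  intro acc v hv
  rw [dist_step_eq, hgetD v hv]
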